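-- pv_equiv track=rewrite | github.com/jleatham/archWeekHug | botFunctions.py | process_arch_filter
-- ===== SOURCE A (Python) =====
-- def process_arch_filter(string):
--     """
--         Take command and search for posible architecture keywords such as 'security' or 'DC'
--         Return the appropriate keyword used in smartsheets as a list
--     """
--     arch_filter = []
--     arch_options = [
--         ("Cross Architecture",["cross","arch"]),
--         ("Security",["sec","security","cyber"]),
--         ("Cyber Security",["sec","security","cyber"]),
--         ("Data Center",["data","dc","datacenter"]),
--         ("Internet of Things (IoT)",["iot"]),
--         ("Cloud",["cloud"]),
--         ("Enterprise Network",["en","enterprise","routing","switching","sw","sda","dna","wireless"]),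
--         ("Collaboration",["col","collab","collaboration","colab","voice","video","webex","contact","cc","ucce","uccx"])
--
--     ]
--     arch_list_provided = string.split(" ")
--     for i in arch_list_provided:
--         for y in arch_options:
--             if i in y[1]:
--                 arch_filter.append(y[0])
--
--     return arch_filter
-- ===== SOURCE B (Python) =====
-- # Idiomatic rewrite: the option table is flattened once, by hand, into a direct
-- # keyword -> categories map (in the category order A emits), so each word costs
-- # a single dict lookup instead of a scan over the whole option table.
-- _KW_TO_CATEGORIES = {
--     "cross": ["Cross Architecture"],
--     "arch": ["Cross Architecture"],
--     "sec": ["Security", "Cyber Security"],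
--     "security": ["Security", "Cyber Security"],
--     "cyber": ["Security", "Cyber Security"],
--     "data": ["Data Center"],
--     "dc": ["Data Center"],
--     "datacenter": ["Data Center"],
--     "iot": ["Internet of Things (IoT)"],
--     "cloud": ["Cloud"],
--     "en": ["Enterprise Network"],
--     "enterprise": ["Enterprise Network"],
--     "routing": ["Enterprise Network"],
--     "switching": ["Enterprise Network"],
--     "sw": ["Enterprise Network"],
--     "sda": ["Enterprise Network"],
--     "dna": ["Enterprise Network"],
--     "wireless": ["Enterprise Network"],
--     "col": ["Collaboration"],
--     "collab": ["Collaboration"],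
--     "collaboration": ["Collaboration"],
--     "colab": ["Collaboration"],
--     "voice": ["Collaboration"],
--     "video": ["Collaboration"],
--     "webex": ["Collaboration"],
--     "contact": ["Collaboration"],
--     "cc": ["Collaboration"],
--     "ucce": ["Collaboration"],
--     "uccx": ["Collaboration"],
-- }
--
-- def process_arch_filter(string):
--     """
--         Take command and search for posible architecture keywords such as 'security' or 'DC'
--         Return the appropriate keyword used in smartsheets as a list
--     """
--     return [cat for word in string.split(" ") for cat in _KW_TO_CATEGORIES.get(word, [])]
-- ===== Notes on version B (the rewrite author's own statement) =====
-- stated objective: idiomatic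
-- what changed: B replaces A's option table and nested scan entirely by a hand-flattened keyword->categories dict literal and a single comprehension doing one dict lookup per word.
import Mathlib
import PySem

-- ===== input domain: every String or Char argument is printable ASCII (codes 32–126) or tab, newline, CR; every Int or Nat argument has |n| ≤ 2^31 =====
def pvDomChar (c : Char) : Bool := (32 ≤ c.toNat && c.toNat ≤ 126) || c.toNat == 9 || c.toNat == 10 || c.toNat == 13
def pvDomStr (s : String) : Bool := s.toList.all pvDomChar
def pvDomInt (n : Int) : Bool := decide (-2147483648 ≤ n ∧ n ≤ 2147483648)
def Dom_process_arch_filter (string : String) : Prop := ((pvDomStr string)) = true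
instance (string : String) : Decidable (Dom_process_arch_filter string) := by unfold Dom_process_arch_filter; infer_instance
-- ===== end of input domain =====

-- B replaces A's per-word scan over the whole option table by a hand-flattened
-- keyword -> categories map and one lookup per word (idiomatic; same result).

-- ===== PORT A =====
def process_arch_filter (string : String) : List String :=
  let arch_options : List (String × List String) := [
    ("Cross Architecture",["cross","arch"]),
    ("Security",["sec","security","cyber"]),
    ("Cyber Security",["sec","security","cyber"]),
    ("Data Center",["data","dc","datacenter"]),
    ("Internet of Things (IoT)",["iot"]),
    ("Cloud",["cloud"]),
    ("Enterprise Network",["en","enterprise","routing","switching","sw","sda","dna","wireless"]),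
    ("Collaboration",["col","collab","collaboration","colab","voice","video","webex","contact","cc","ucce","uccx"])
  ]
  let arch_list_provided := (PySem.Str.split? string " ").getD []
  arch_list_provided.foldl (fun arch_filter i =>
    arch_options.foldl (fun arch_filter y =>
      if i ∈ y.2 then arch_filter ++ [y.1] else arch_filter) arch_filter) []

-- ===== PORT B =====
-- the hand-written _KW_TO_CATEGORIES dict literal of Source B
def pvKwToCategories : PySem.Dict String (List String) := PySem.Dict.mk [
  ("cross", ["Cross Architecture"]),
  ("arch", ["Cross Architecture"]),
  ("sec", ["Security", "Cyber Security"]),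
  ("security", ["Security", "Cyber Security"]),
  ("cyber", ["Security", "Cyber Security"]),
  ("data", ["Data Center"]),
  ("dc", ["Data Center"]),
  ("datacenter", ["Data Center"]),
  ("iot", ["Internet of Things (IoT)"]),
  ("cloud", ["Cloud"]),
  ("en", ["Enterprise Network"]),
  ("enterprise", ["Enterprise Network"]),
  ("routing", ["Enterprise Network"]),
  ("switching", ["Enterprise Network"]),
  ("sw", ["Enterprise Network"]),
  ("sda", ["Enterprise Network"]),
  ("dna", ["Enterprise Network"]),
  ("wireless", ["Enterprise Network"]),
  ("col", ["Collaboration"]),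
  ("collab", ["Collaboration"]),
  ("collaboration", ["Collaboration"]),
  ("colab", ["Collaboration"]),
  ("voice", ["Collaboration"]),
  ("video", ["Collaboration"]),
  ("webex", ["Collaboration"]),
  ("contact", ["Collaboration"]),
  ("cc", ["Collaboration"]),
  ("ucce", ["Collaboration"]),
  ("uccx", ["Collaboration"])]

-- [cat for word in string.split(" ") for cat in _KW_TO_CATEGORIES.get(word, [])]
def process_arch_filter_alt (string : String) : List String :=
  ((PySem.Str.split? string " ").getD []).flatMap (fun word => pvKwToCategories.getD word [])

-- ===== PRECONDITION & SPEC =====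
def Spec_process_arch_filter (string : String) (out : List String) : Prop := out = process_arch_filter_alt string
instance (string : String) (out : List String) : Decidable (Spec_process_arch_filter string out) := by unfold Spec_process_arch_filter; infer_instance

-- ===== CLAIM (what is proved, stated in full; the proofs are below) =====
def Claim_equal_process_arch_filter : Prop := ∀ (string : String), Dom_process_arch_filter string → Spec_process_arch_filter string (process_arch_filter string)

-- ===== LEMMAS AND PROOFS =====

-- the keywords of the option table, in first-occurrence order (= the dict's keys)
def pvAllKeywords : List String :=
  ["cross","arch","sec","security","cyber","data","dc","datacenter","iot","cloud",
   "en","enterprise","routing","switching","sw","sda","dna","wireless",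
   "col","collab","collaboration","colab","voice","video","webex","contact","cc","ucce","uccx"]

-- per word, A's inner scan of the option table produces exactly B's dict entry
lemma pv_inner (w : String) (acc : List String) :
    ([("Cross Architecture",["cross","arch"]),
      ("Security",["sec","security","cyber"]),
      ("Cyber Security",["sec","security","cyber"]),
      ("Data Center",["data","dc","datacenter"]),
      ("Internet of Things (IoT)",["iot"]),
      ("Cloud",["cloud"]),
      ("Enterprise Network",["en","enterprise","routing","switching","sw","sda","dna","wireless"]),
      ("Collaboration",["col","collab","collaboration","colab","voice","video","webex","contact","cc","ucce","uccx"])]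
        : List (String × List String)).foldl (fun arch_filter y =>
      if w ∈ y.2 then arch_filter ++ [y.1] else arch_filter) acc
      = acc ++ pvKwToCategories.getD w [] := by
  by_cases hw : w ∈ pvAllKeywords
  · simp only [pvAllKeywords, List.mem_cons, List.not_mem_nil, or_false] at hw
    rcases hw with rfl|rfl|rfl|rfl|rfl|rfl|rfl|rfl|rfl|rfl|rfl|rfl|rfl|rfl|rfl|rfl|rfl|rfl|rfl|rfl|rfl|rfl|rfl|rfl|rfl|rfl|rfl|rfl|rfl <;>
      simp [pvKwToCategories, PySem.Dict.getD, PySem.Dict.get?]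
  · simp only [pvAllKeywords, List.mem_cons, List.not_mem_nil, or_false, not_or] at hw
    obtain ⟨h1,h2,h3,h4,h5,h6,h7,h8,h9,h10,h11,h12,h13,h14,h15,h16,h17,h18,h19,h20,h21,h22,h23,h24,h25,h26,h27,h28,h29⟩ := hw
    simp [pvKwToCategories, PySem.Dict.getD, PySem.Dict.get?,
      h1,h2,h3,h4,h5,h6,h7,h8,h9,h10,h11,h12,h13,h14,h15,h16,h17,h18,h19,h20,h21,h22,h23,h24,h25,h26,h27,h28,h29,
      Ne.symm h1, Ne.symm h2, Ne.symm h3, Ne.symm h4, Ne.symm h5, Ne.symm h6, Ne.symm h7, Ne.symm h8,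
      Ne.symm h9, Ne.symm h10, Ne.symm h11, Ne.symm h12, Ne.symm h13, Ne.symm h14, Ne.symm h15,
      Ne.symm h16, Ne.symm h17, Ne.symm h18, Ne.symm h19, Ne.symm h20, Ne.symm h21, Ne.symm h22,
      Ne.symm h23, Ne.symm h24, Ne.symm h25, Ne.symm h26, Ne.symm h27, Ne.symm h28, Ne.symm h29]

-- ===== VERDICT (by name: the statement is the Claim_ definition above) =====
theorem process_arch_filter_spec : Claim_equal_process_arch_filter := by
  intro s _
  unfold Spec_process_arch_filter process_arch_filter process_arch_filter_alt
  simp only []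
  have hf : (fun (arch_filter : List String) (i : String) =>
      ([("Cross Architecture",["cross","arch"]),
        ("Security",["sec","security","cyber"]),
        ("Cyber Security",["sec","security","cyber"]),
        ("Data Center",["data","dc","datacenter"]),
        ("Internet of Things (IoT)",["iot"]),
        ("Cloud",["cloud"]),
        ("Enterprise Network",["en","enterprise","routing","switching","sw","sda","dna","wireless"]),
        ("Collaboration",["col","collab","collaboration","colab","voice","video","webex","contact","cc","ucce","uccx"])]
          : List (String × List String)).foldl (fun arch_filter y =>
        if i ∈ y.2 then arch_filter ++ [y.1] else arch_filter) arch_filter)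
      = (fun arch_filter i => arch_filter ++ pvKwToCategories.getD i []) := by
    funext acc w; exact pv_inner w acc
  rw [hf, PySem.List.foldl_append_eq_flatMap]
  rfl
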